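-- pv_equiv track=rewrite | github.com/uditbabele/algorithm-visualizer | backend/algorithms/union_find.py | union_find_steps
-- ===== SOURCE A (Python) =====
-- def union_find_steps(ops):
--
--     parent = {}
--     steps = []
--
--     def find(x):
--         if parent[x] != x:
--             parent[x] = find(parent[x])
--         return parent[x]
--
--     def union(a,b):
--
--         pa = find(a)
--         pb = find(b)
--
--         if pa != pb:
--             parent[pb] = pa
--
--     for op in ops:
--
--         if op[0] == "make":
--
--             parent[op[1]] = op[1]
--
--             steps.append({
--                 "action":"create",
--                 "node":op[1]
--             })
--
--         if op[0] == "union":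
--
--             union(op[1],op[2])
--
--             steps.append({
--                 "action":"union",
--                 "a":op[1],
--                 "b":op[2]
--             })
--
--     return steps
-- ===== SOURCE B (Python) =====
-- def union_find_steps(ops):
--     # The union-find state in A never influences the returned log: build the steps directly.
--     steps = []
--     for op in ops:
--         if op[0] == "make":
--             steps.append({"action": "create", "node": op[1]})
--         elif op[0] == "union":
--             steps.append({"action": "union", "a": op[1], "b": op[2]})
--     return steps
-- ===== Notes on version B (the rewrite author's own statement) =====
-- stated objective: simpler
-- what changed: B drops the entire union-find data structure (parent dict, recursive find with path compression, union), which never influences A's returned step log, and builds the log in one direct pass over ops.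
import Mathlib
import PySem

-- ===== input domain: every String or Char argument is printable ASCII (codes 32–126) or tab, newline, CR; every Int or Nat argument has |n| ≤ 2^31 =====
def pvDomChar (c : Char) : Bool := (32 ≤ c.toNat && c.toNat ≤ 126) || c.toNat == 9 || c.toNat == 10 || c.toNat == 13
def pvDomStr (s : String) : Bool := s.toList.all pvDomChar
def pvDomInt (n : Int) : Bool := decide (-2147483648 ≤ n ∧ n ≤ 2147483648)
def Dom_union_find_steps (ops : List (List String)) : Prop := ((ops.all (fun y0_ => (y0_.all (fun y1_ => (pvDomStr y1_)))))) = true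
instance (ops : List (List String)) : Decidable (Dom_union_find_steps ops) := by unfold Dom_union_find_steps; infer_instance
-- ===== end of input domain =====

-- B drops A's union-find state (parent dict, recursive path-compressing find, union), which never
-- influences the returned step log, and builds the log in one direct pass (objective: simpler).

-- ===== PORT A =====
-- recursive find with path compression; fuel makes the recursion total (fuel exhaustion and the
-- missing-key case are Python KeyError territory, excluded by Pre_)
def pvFindA (fuel : Nat) (parent : PySem.Dict String String) (x : String) :
    PySem.Dict String String × String :=
  match fuel with
  | 0 => (parent, x)            -- unreachable under Pre_
  | n+1 =>
    match parent.get? x with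
    | none => (parent, x)       -- KeyError in Python; excluded by Pre_
    | some p =>
      if p ≠ x then
        let (parent', r) := pvFindA n parent p
        (parent'.insert x r, r) -- parent[x] = find(parent[x]); return parent[x]
      else (parent, p)          -- return parent[x]

def pvUnionA (parent : PySem.Dict String String) (a b : String) : PySem.Dict String String :=
  let (p1, pa) := pvFindA (parent.size + 1) parent a
  let (p2, pb) := pvFindA (p1.size + 1) p1 b
  if pa ≠ pb then p2.insert pb pa else p2

def pvStepA (st : PySem.Dict String String × List (List (String × String)))
    (op : List String) : PySem.Dict String String × List (List (String × String)) :=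
  match PySem.List.pyGet? op 0 with
  | none => st                  -- op[0] IndexError; excluded by Pre_
  | some o0 =>
    let st1 :=
      if o0 = "make" then
        match PySem.List.pyGet? op 1 with
        | none => st            -- op[1] IndexError; excluded by Pre_
        | some node => (st.1.insert node node, st.2 ++ [[("action", "create"), ("node", node)]])
      else st
    if o0 = "union" then
      match PySem.List.pyGet? op 1, PySem.List.pyGet? op 2 with
      | some a, some b => (pvUnionA st1.1 a b, st1.2 ++ [[("action", "union"), ("a", a), ("b", b)]])
      | _, _ => st1             -- IndexError; excluded by Pre_
    else st1

def union_find_steps (ops : List (List String)) : List (List (String × String)) :=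
  (ops.foldl pvStepA (PySem.Dict.empty, [])).2

-- ===== PORT B =====
def pvStepB (steps : List (List (String × String))) (op : List String) :
    List (List (String × String)) :=
  match PySem.List.pyGet? op 0 with
  | none => steps               -- op[0] IndexError; excluded by Pre_
  | some o0 =>
    if o0 = "make" then
      match PySem.List.pyGet? op 1 with
      | none => steps
      | some node => steps ++ [[("action", "create"), ("node", node)]]
    else if o0 = "union" then
      match PySem.List.pyGet? op 1, PySem.List.pyGet? op 2 with
      | some a, some b => steps ++ [[("action", "union"), ("a", a), ("b", b)]]
      | _, _ => steps
    else steps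

def union_find_steps_alt (ops : List (List String)) : List (List (String × String)) :=
  ops.foldl pvStepB []

-- ===== PRECONDITION & SPEC =====
-- Pre_ excludes exactly the inputs where A raises: an op too short for its kind (IndexError),
-- or a "union" op naming a node that no earlier "make" op created (KeyError in find).
def Pre_union_find_steps (ops : List (List String)) : Prop :=
  ∀ i < ops.length,
    1 ≤ (ops.getD i []).length ∧
    ((ops.getD i []).getD 0 "" = "make" → 2 ≤ (ops.getD i []).length) ∧
    ((ops.getD i []).getD 0 "" = "union" →
      3 ≤ (ops.getD i []).length ∧
      ∀ k ∈ [(ops.getD i []).getD 1 "", (ops.getD i []).getD 2 ""],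
        ∃ j < i, (ops.getD j []).getD 0 "" = "make" ∧
          2 ≤ (ops.getD j []).length ∧ (ops.getD j []).getD 1 "" = k)
instance (ops : List (List String)) : Decidable (Pre_union_find_steps ops) := by
  unfold Pre_union_find_steps; infer_instance

def pvWitness_union_find_steps : List (List String) :=
  [["make", "a"], ["make", "b"], ["union", "a", "b"], ["union", "b", "a"]]

def Spec_union_find_steps (ops : List (List String)) (out : List (List (String × String))) : Prop := out = union_find_steps_alt ops
instance (ops : List (List String)) (out : List (List (String × String))) : Decidable (Spec_union_find_steps ops out) := by unfold Spec_union_find_steps; infer_instance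

-- ===== CLAIM (what is proved, stated in full; the proofs are below) =====
def Claim_equal_union_find_steps : Prop := ∀ (ops : List (List String)), Dom_union_find_steps ops → Pre_union_find_steps ops → Spec_union_find_steps ops (union_find_steps ops)

-- ===== LEMMAS AND PROOFS =====
-- A's per-op step only mutates the dict besides appending exactly what B appends.
theorem pvStepA_snd (st : PySem.Dict String String × List (List (String × String)))
    (op : List String) : (pvStepA st op).2 = pvStepB st.2 op := by
  unfold pvStepA pvStepB
  cases h0 : PySem.List.pyGet? op 0 with
  | none => rfl
  | some o0 =>
    by_cases hm : o0 = "make"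
    · subst hm
      cases h1 : PySem.List.pyGet? op 1 <;> rfl
    · by_cases hu : o0 = "union"
      · subst hu
        simp only [if_neg hm]
        cases h1 : PySem.List.pyGet? op 1 <;> cases h2 : PySem.List.pyGet? op 2 <;> simp
      · simp [if_neg hm, if_neg hu]

theorem foldl_pvStepA_snd (ops : List (List String))
    (st : PySem.Dict String String × List (List (String × String))) :
    (ops.foldl pvStepA st).2 = ops.foldl pvStepB st.2 := by
  induction ops generalizing st with
  | nil => rfl
  | cons op rest ih => simp only [List.foldl_cons, ih, pvStepA_snd]

-- ===== VERDICT (by name: the statement is the Claim_ definition above) =====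
theorem union_find_steps_spec : Claim_equal_union_find_steps := by
  intro ops _ _
  unfold Spec_union_find_steps union_find_steps union_find_steps_alt
  exact foldl_pvStepA_snd ops _
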